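-- pv_equiv track=rewrite | github.com/valerio-fusco/HackerRankPythonSolution | gradingStudents.py | closest_multiple_number
-- ===== SOURCE A (Python) =====
-- multiples_5 = [n for n in range(1, 101) if n % 5 == 0]
--
-- def diff_from_two_number(a, b):
--     return abs(a - b)
--
-- def closest_multiple_number(n):
--     closest_multiple = 0
--
--     for i in multiples_5:
--         n_diff = diff_from_two_number(n, i)
--         if n_diff < 3:
--             closest_multiple = i
--
--     if closest_multiple > n:
--         return closest_multiple
--
--     return n
-- ===== SOURCE B (Python) =====
-- def closest_multiple_number(n):
--     m = ((n + 2) // 5) * 5  # largest multiple of 5 strictly below n + 3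
--     c = m if 5 <= m <= 100 and m > n - 3 else 0
--     return c if c > n else n
-- ===== Notes on version B (the rewrite author's own statement) =====
-- stated objective: simpler
-- what changed: Replaced the scan over the precomputed list of multiples of 5 with a closed-form floor-division computation of the unique candidate multiple in the window (n-3, n+3).
import Mathlib
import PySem

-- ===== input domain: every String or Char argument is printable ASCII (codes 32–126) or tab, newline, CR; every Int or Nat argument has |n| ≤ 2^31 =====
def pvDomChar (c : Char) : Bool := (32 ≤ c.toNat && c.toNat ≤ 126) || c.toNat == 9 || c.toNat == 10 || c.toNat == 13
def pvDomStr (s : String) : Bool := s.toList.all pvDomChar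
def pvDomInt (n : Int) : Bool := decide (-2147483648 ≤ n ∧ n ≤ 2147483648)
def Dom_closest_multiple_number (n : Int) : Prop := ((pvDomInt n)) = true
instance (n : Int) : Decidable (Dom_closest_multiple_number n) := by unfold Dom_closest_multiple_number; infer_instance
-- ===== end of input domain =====

-- B replaces A's scan over the list of multiples of 5 with a closed-form floor-division formula (simpler).

-- ===== PORT A =====
def multiples_5 : List Int :=
  (PySem.List.pyRange 1 101 1).filter (fun n => PySem.Int.mod n 5 == 0)

def diff_from_two_number (a b : Int) : Int := |a - b|

def closest_multiple_number (n : Int) : Int :=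
  let closest_multiple :=
    multiples_5.foldl (fun closest_multiple i =>
      let n_diff := diff_from_two_number n i
      if n_diff < 3 then i else closest_multiple) 0
  if closest_multiple > n then closest_multiple else n

-- ===== PORT B =====
def closest_multiple_number_alt (n : Int) : Int :=
  let m := (PySem.Int.floordiv (n + 2) 5) * 5
  let c := if 5 ≤ m ∧ m ≤ 100 ∧ m > n - 3 then m else 0
  if c > n then c else n

-- ===== PRECONDITION & SPEC =====
def Spec_closest_multiple_number (n : Int) (out : Int) : Prop := out = closest_multiple_number_alt n
instance (n : Int) (out : Int) : Decidable (Spec_closest_multiple_number n out) := by unfold Spec_closest_multiple_number; infer_instance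

-- ===== CLAIM (what is proved, stated in full; the proofs are below) =====
def Claim_equal_closest_multiple_number : Prop := ∀ (n : Int), Dom_closest_multiple_number n → Spec_closest_multiple_number n (closest_multiple_number n)

-- ===== LEMMAS AND PROOFS =====

-- If no element of the list hits the window, the fold keeps its initial 0.
theorem fold_no_hit (n : Int) (l : List Int) (h : ∀ i ∈ l, ¬ (|n - i| < 3)) :
    l.foldl (fun closest_multiple i =>
      let n_diff := diff_from_two_number n i
      if n_diff < 3 then i else closest_multiple) 0 = 0 := by
  induction l with
  | nil => rfl
  | cons a t ih =>
    simp only [List.foldl_cons, diff_from_two_number]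
    rw [if_neg (h a (by simp))]
    exact ih (fun i hi => h i (by simp [hi]))

theorem multiples_5_bounds : ∀ i ∈ multiples_5, 5 ≤ i ∧ i ≤ 100 := by decide

theorem outside_A (n : Int) (h : n < 3 ∨ 102 < n) : closest_multiple_number n = if 0 > n then 0 else n := by
  unfold closest_multiple_number
  rw [fold_no_hit n multiples_5]
  intro i hi
  have hb := multiples_5_bounds i hi
  rw [abs_lt]
  omega

theorem outside_B (n : Int) (h : n < 3 ∨ 102 < n) : closest_multiple_number_alt n = if 0 > n then 0 else n := by
  unfold closest_multiple_number_alt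
  rw [PySem.Int.floordiv_eq_ediv_of_pos (by omega)]
  simp only []
  split_ifs <;> omega

theorem closest_multiple_number_spec : Claim_equal_closest_multiple_number := by
  intro n _
  unfold Spec_closest_multiple_number
  by_cases h : n < 3 ∨ 102 < n
  · rw [outside_A n h, outside_B n h]
  · have h1 : 3 ≤ n := by omega
    have h2 : n ≤ 102 := by omega
    interval_cases n <;> decide
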